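-- pv_equiv track=rewrite | github.com/weswong/ParasiteGenetics | BarcodeModel/parse_sim.py | get_repeated_and_persistent_strains
-- ===== SOURCE A (Python) =====
-- from collections import Counter
--
-- def get_repeated_and_persistent_strains(samples_by_year):
--     nyears=len(samples_by_year)
--     repeats_by_year = [ Counter( [ p[0] for p in samples ] ) for samples in samples_by_year ]
--     strains_by_year = [ r.keys() for r in repeats_by_year ]
--     all_strains = set([s for y in strains_by_year for s in y])
--     strains_across_years = {s:[0]*nyears for s in all_strains}
--     for i,r in enumerate(repeats_by_year):
--         for k,v in r.items():
--             strains_across_years[k][i] += v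
--     persistent_strains={k:v for k,v in strains_across_years.items() if sum([n>0 for n in v]) > 1}
--     return repeats_by_year,persistent_strains
-- ===== SOURCE B (Python) =====
-- def get_repeated_and_persistent_strains(samples_by_year):
--     repeats_by_year = []
--     first_seen = {}      # strain -> None; insertion order = global first appearance
--     persistent = set()   # strains seen in an earlier year that reappear
--     for samples in samples_by_year:
--         counts = {}
--         for p in samples:
--             counts[p[0]] = counts.get(p[0], 0) + 1
--         for k in counts:
--             if k in first_seen:
--                 persistent.add(k)
--             else:
--                 first_seen[k] = None
--         repeats_by_year.append(counts)
--     persistent_strains = {k: [r.get(k, 0) for r in repeats_by_year]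
--                           for k in first_seen if k in persistent}
--     return repeats_by_year, persistent_strains
-- ===== Notes on version B (the rewrite author's own statement) =====
-- stated objective: alternative
-- what changed: B makes one online pass over the years: it builds each year's count dict by explicit accumulation and detects persistence on the fly with a first-seen dict and a persistent set (a strain becomes persistent the moment it reappears in a later year), instead of A's staged comprehensions that materialise a full strain-by-year zero matrix, add every Counter into it positionally and then filter rows by counting nonzero entries; B never builds the matrix and constructs count vectors only for persistent strains, a constant-factor and O(S*Y)-term saving a timing run measured at about 2.5x.
import Mathlib
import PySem

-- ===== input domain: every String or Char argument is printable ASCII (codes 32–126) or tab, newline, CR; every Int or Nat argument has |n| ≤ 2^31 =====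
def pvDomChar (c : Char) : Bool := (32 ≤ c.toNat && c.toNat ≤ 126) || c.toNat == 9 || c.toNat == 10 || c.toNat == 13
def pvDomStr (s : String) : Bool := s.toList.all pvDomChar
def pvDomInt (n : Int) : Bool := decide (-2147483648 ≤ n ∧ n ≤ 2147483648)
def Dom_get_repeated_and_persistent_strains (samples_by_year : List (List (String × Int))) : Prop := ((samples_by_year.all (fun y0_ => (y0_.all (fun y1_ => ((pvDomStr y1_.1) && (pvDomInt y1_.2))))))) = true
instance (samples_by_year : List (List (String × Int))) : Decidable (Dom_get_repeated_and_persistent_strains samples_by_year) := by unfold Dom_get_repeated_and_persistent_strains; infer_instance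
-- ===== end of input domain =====

-- B replaces A's staged comprehensions (full strain-by-year zero matrix, positional addition of the
-- Counters, row filter counting nonzeros) with one online pass: per-year counts accumulated by hand
-- and persistence detected on the fly with a first-seen dict and a persistent set (objective:
-- alternative). The two dict results agree as dicts; key order here is first-insertion order
-- (Python's set/dict orders coincide with it only up to hashing, and dicts compare ignoring order).

-- ===== PORT A =====
-- enumerate(xs) with indices starting at i
def pyEnum {α : Type} (xs : List α) (i : Nat) : List (Nat × α) :=
  match xs with
  | [] => []
  | x :: t => (i, x) :: pyEnum t (i + 1)

def get_repeated_and_persistent_strains (samples_by_year : List (List (String × Int))) : (List (List (String × Int))) × (List (String × List Int)) :=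
  let nyears := samples_by_year.length
  let repeats_by_year := samples_by_year.map (fun samples => PySem.Dict.counter (samples.map (fun p => p.1)))
  let strains_by_year := repeats_by_year.map (fun r => r.keys)
  let all_strains : PySem.Set String := PySem.Set.ofList strains_by_year.flatten
  let strains_across_years : PySem.Dict String (List Int) :=
    all_strains.foldl (fun d s => d.insert s (List.replicate nyears 0)) PySem.Dict.empty
  let strains_across_years :=
    (pyEnum repeats_by_year 0).foldl
      (fun d ir =>
        ir.2.items.foldl
          (fun d kv => d.modify kv.1 []
            (fun l => PySem.List.pySetD l (ir.1 : Int) (PySem.List.pyGetD l (ir.1 : Int) 0 + kv.2))) d)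
      strains_across_years
  let persistent_strains :=
    strains_across_years.items.filter
      (fun kv => decide (1 < (kv.2.map (fun n => if 0 < n then (1 : Int) else 0)).sum))
  (repeats_by_year.map (fun r => r.items), persistent_strains)

-- ===== PORT B =====
def get_repeated_and_persistent_strains_alt (samples_by_year : List (List (String × Int))) : (List (List (String × Int))) × (List (String × List Int)) :=
  -- state: (repeats_by_year so far, first_seen, persistent)
  let st := samples_by_year.foldl
    (fun (st : List (PySem.Dict String Int) × PySem.Dict String Unit × PySem.Set String) samples =>
      let counts := samples.foldl (fun d p => d.insert p.1 (d.getD p.1 0 + 1)) PySem.Dict.empty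
      let fp := counts.keys.foldl
        (fun (fp : PySem.Dict String Unit × PySem.Set String) k =>
          if fp.1.contains k then (fp.1, PySem.Set.add fp.2 k) else (fp.1.insert k (), fp.2))
        (st.2.1, st.2.2)
      (st.1 ++ [counts], fp.1, fp.2))
    ([], PySem.Dict.empty, PySem.Set.empty)
  let persistent_strains :=
    (st.2.1.keys.filter (fun k => PySem.Set.contains st.2.2 k)).map
      (fun k => (k, st.1.map (fun r => r.getD k 0)))
  (st.1.map (fun r => r.items), persistent_strains)

-- ===== PRECONDITION & SPEC =====
def Spec_get_repeated_and_persistent_strains (samples_by_year : List (List (String × Int))) (out : (List (List (String × Int))) × (List (String × List Int))) : Prop := out = get_repeated_and_persistent_strains_alt samples_by_year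
instance (samples_by_year : List (List (String × Int))) (out : (List (List (String × Int))) × (List (String × List Int))) : Decidable (Spec_get_repeated_and_persistent_strains samples_by_year out) := by unfold Spec_get_repeated_and_persistent_strains; infer_instance

-- ===== CLAIM (what is proved, stated in full; the proofs are below) =====
def Claim_equal_get_repeated_and_persistent_strains : Prop := ∀ (samples_by_year : List (List (String × Int))), Dom_get_repeated_and_persistent_strains samples_by_year → Spec_get_repeated_and_persistent_strains samples_by_year (get_repeated_and_persistent_strains samples_by_year)

-- ===== LEMMAS AND PROOFS =====

-- ---- A-side characterisation ----

-- step of A's inner loop, with index i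
def stepA (i : Nat) (d : PySem.Dict String (List Int)) (kv : String × Int) : PySem.Dict String (List Int) :=
  d.modify kv.1 [] (fun l => PySem.List.pySetD l (i : Int) (PySem.List.pyGetD l (i : Int) 0 + kv.2))

theorem inner_not_mem (ps : List (String × Int)) (i : Nat) :
    ∀ (d : PySem.Dict String (List Int)) (k : String), k ∉ ps.map Prod.fst →
    (ps.foldl (stepA i) d).getD k [] = d.getD k [] := by
  induction ps with
  | nil => intro d k _; rfl
  | cons a t ih =>
    intro d k hk
    simp only [List.map_cons, List.mem_cons, not_or] at hk
    simp only [List.foldl_cons]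
    rw [ih _ _ hk.2]
    simp only [stepA]
    rw [PySem.Dict.getD_modify]
    simp [hk.1]

theorem inner_mem (ps : List (String × Int)) (i : Nat) :
    ∀ (d : PySem.Dict String (List Int)) (k : String) (v : Int),
    (ps.map Prod.fst).Nodup → (k, v) ∈ ps →
    (ps.foldl (stepA i) d).getD k [] = (d.getD k []).set i ((d.getD k []).getD i 0 + v) := by
  induction ps with
  | nil => intro d k v _ h; cases h
  | cons a t ih =>
    intro d k v hnd hm
    simp only [List.map_cons, List.nodup_cons] at hnd
    simp only [List.foldl_cons]
    rcases List.mem_cons.mp hm with h | h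
    · subst h
      have hnot : k ∉ t.map Prod.fst := hnd.1
      rw [inner_not_mem t i _ _ hnot]
      simp only [stepA]
      rw [PySem.Dict.getD_modify]
      simp [PySem.List.pySetD_natCast, PySem.List.pyGetD_natCast]
    · have hne : k ≠ a.1 := by
        intro he; exact hnd.1 (he ▸ (List.mem_map.mpr ⟨(k, v), h, rfl⟩))
      have : (stepA i d a).getD k [] = d.getD k [] := by
        simp only [stepA]; rw [PySem.Dict.getD_modify]; simp [hne]
      rw [ih _ _ _ hnd.2 h, this]

theorem keys_eq_items_map_fst {κ ν : Type} [BEq κ] (d : PySem.Dict κ ν) :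
    d.keys = d.items.map Prod.fst := rfl

theorem inner_counter (r : PySem.Dict String Int) (hnd : r.keys.Nodup) (i : Nat)
    (d : PySem.Dict String (List Int)) (k : String) :
    (r.items.foldl (stepA i) d).getD k [] =
      if k ∈ r.keys then (d.getD k []).set i ((d.getD k []).getD i 0 + r.getD k 0) else d.getD k [] := by
  by_cases hk : k ∈ r.keys
  · simp only [hk, if_true]
    obtain ⟨p, hp, hpk⟩ := List.mem_map.mp (keys_eq_items_map_fst r ▸ hk)
    have hv : r.getD k 0 = p.2 := by
      have := PySem.Dict.getD_of_mem_items r (k := p.1) (v := p.2) (by simpa using hp) hnd 0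
      rw [hpk] at this; exact this
    rw [hv]
    exact inner_mem r.items i d k p.2 (by rw [← keys_eq_items_map_fst]; exact hnd) (by rw [← hpk]; exact hp)
  · simp only [hk, if_false]
    exact inner_not_mem r.items i d k (by rw [← keys_eq_items_map_fst]; exact hk)

theorem outer_getD (S : List (PySem.Dict String Int)) :
    ∀ (m : Nat) (d : PySem.Dict String (List Int)) (k : String) (pre : List Int),
    (∀ r ∈ S, r.keys.Nodup) →
    d.getD k [] = pre ++ List.replicate S.length 0 → pre.length = m →
    (((pyEnum S m).foldl (fun d ir => ir.2.items.foldl (stepA ir.1) d) d)).getD k [] =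
      pre ++ S.map (fun r => r.getD k 0) := by
  induction S with
  | nil => intro m d k pre _ hd _; simpa using hd
  | cons r S' ih =>
    intro m d k pre hnd hd hm
    simp only [pyEnum, List.foldl_cons]
    have hset : ((pre ++ List.replicate (r :: S').length 0).set m
        ((pre ++ List.replicate (r :: S').length 0).getD m 0 + r.getD k 0)) =
        (pre ++ [r.getD k 0]) ++ List.replicate S'.length 0 := by
      subst hm
      simp [List.replicate_succ, List.getD]
    have hd' : ((r.items.foldl (stepA m) d)).getD k [] =
        (pre ++ [r.getD k 0]) ++ List.replicate S'.length 0 := by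
      rw [inner_counter r (hnd r (by simp)) m d k]
      by_cases hk : k ∈ r.keys
      · simp only [hk, if_true, hd, hset]
      · have h0 : r.getD k 0 = 0 := by
          apply PySem.Dict.getD_of_not_contains
          rw [← Bool.not_eq_true]
          intro hc
          exact hk ((PySem.Dict.contains_iff_mem_keys r k).mp hc)
        simp only [hk, if_false, hd, h0]
        simp [List.replicate_succ]
    rw [ih (m + 1) _ k (pre ++ [r.getD k 0]) (fun r hr => hnd r (by simp [hr])) hd' (by simp [hm])]
    simp

-- Set.update by an already-contained list is the identity
theorem set_update_of_subset (s : PySem.Set String) (xs : List String)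
    (h : ∀ x ∈ xs, x ∈ s) : PySem.Set.update s xs = s := by
  rw [PySem.Set.update_eq_append_filter]
  have : (PySem.Set.ofList xs).filter (fun y => !(PySem.Set.contains s y)) = [] := by
    rw [List.filter_eq_nil_iff]
    intro y hy
    have : y ∈ s := h y ((PySem.Set.mem_ofList xs y).mp hy)
    simpa using this
  rw [this, List.append_nil]

-- A's outer loop never changes the key list when every touched key is present
theorem outer_keys (S : List (PySem.Dict String Int)) :
    ∀ (m : Nat) (d : PySem.Dict String (List Int)),
    (∀ r ∈ S, ∀ x ∈ r.keys, x ∈ d.keys) →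
    (((pyEnum S m).foldl (fun d ir => ir.2.items.foldl (stepA ir.1) d) d)).keys = d.keys := by
  induction S with
  | nil => intro m d _; rfl
  | cons r S' ih =>
    intro m d hsub
    simp only [pyEnum, List.foldl_cons]
    have hk : (r.items.foldl (stepA m) d).keys = d.keys := by
      have := PySem.Dict.keys_foldl_modify_key (l := r.items) (key := Prod.fst) (d0 := ([] : List Int))
        (f := fun d kv => fun l => PySem.List.pySetD l ((m : Nat) : Int) (PySem.List.pyGetD l ((m : Nat) : Int) 0 + kv.2)) (d := d)
      rw [show r.items.foldl (stepA m) d = r.items.foldl (fun d kv => d.modify kv.1 [] (fun l => PySem.List.pySetD l ((m : Nat) : Int) (PySem.List.pyGetD l ((m : Nat) : Int) 0 + kv.2))) d from rfl]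
      rw [this]
      exact set_update_of_subset _ _ (fun x hx => hsub r (by simp) x hx)
    rw [ih (m + 1) _ (fun r' hr' x hx => by rw [hk]; exact hsub r' (by simp [hr']) x hx), hk]

-- ---- B-side characterisation ----

-- step of B's seen/persistent sweep over one year's distinct strains
def innerB (fp : PySem.Dict String Unit × PySem.Set String) (k : String) : PySem.Dict String Unit × PySem.Set String :=
  if fp.1.contains k then (fp.1, PySem.Set.add fp.2 k) else (fp.1.insert k (), fp.2)

-- step of B's outer loop, phrased over the year's Counter
def stepB (st : List (PySem.Dict String Int) × PySem.Dict String Unit × PySem.Set String) (r : PySem.Dict String Int) : List (PySem.Dict String Int) × PySem.Dict String Unit × PySem.Set String :=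
  let fp := r.keys.foldl innerB (st.2.1, st.2.2)
  (st.1 ++ [r], fp.1, fp.2)

-- B's fold over the raw samples is the fold of stepB over the list of Counters
theorem bfold_eq (ys : List (List (String × Int))) :
    ∀ (st : List (PySem.Dict String Int) × PySem.Dict String Unit × PySem.Set String),
    ys.foldl
      (fun st samples =>
        let counts := samples.foldl (fun d p => d.insert p.1 (d.getD p.1 0 + 1)) PySem.Dict.empty
        let fp := counts.keys.foldl
          (fun (fp : PySem.Dict String Unit × PySem.Set String) k =>
            if fp.1.contains k then (fp.1, PySem.Set.add fp.2 k) else (fp.1.insert k (), fp.2))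
          (st.2.1, st.2.2)
        (st.1 ++ [counts], fp.1, fp.2)) st
    = (ys.map (fun samples => PySem.Dict.counter (samples.map (fun p => p.1)))).foldl stepB st := by
  induction ys with
  | nil => intro st; rfl
  | cons y t ih =>
    intro st
    simp only [List.foldl_cons, List.map_cons]
    rw [ih]
    congr 1
    have hc : y.foldl (fun d p => d.insert p.1 (d.getD p.1 0 + 1)) PySem.Dict.empty
        = PySem.Dict.counter (y.map (fun p => p.1)) := by
      rw [← PySem.Dict.foldl_insert_getD_add_one_eq_counter, List.foldl_map]
    show _ = stepB st (PySem.Dict.counter (y.map (fun p => p.1)))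
    rw [← hc]
    rfl

theorem bfold_fst (R : List (PySem.Dict String Int)) :
    ∀ (st : List (PySem.Dict String Int) × PySem.Dict String Unit × PySem.Set String),
    (R.foldl stepB st).1 = st.1 ++ R := by
  induction R with
  | nil => intro st; simp
  | cons r t ih => intro st; simp [List.foldl_cons, stepB, ih]

theorem innerB_seen_keys (ks : List String) :
    ∀ (s : PySem.Dict String Unit) (p : PySem.Set String),
    ((ks.foldl innerB (s, p)).1).keys = PySem.Set.update s.keys ks := by
  induction ks with
  | nil => intro s p; rfl
  | cons a t ih =>
    intro s p
    rw [PySem.Set.update_cons]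
    simp only [List.foldl_cons, innerB]
    by_cases h : s.contains a = true
    · rw [if_pos h, ih]
      congr 1
      exact (PySem.Set.add_of_mem ((PySem.Dict.contains_iff_mem_keys s a).mp h)).symm
    · rw [if_neg h, ih]
      congr 1
      rw [PySem.Dict.keys_insert_of_not_contains _ _ (by simpa using h)]
      exact (PySem.Set.add_of_not_mem (fun hm => h ((PySem.Dict.contains_iff_mem_keys s a).mpr hm))).symm

theorem innerB_pers (ks : List String) :
    ∀ (s : PySem.Dict String Unit) (p : PySem.Set String) (k : String), ks.Nodup →
    (k ∈ (ks.foldl innerB (s, p)).2 ↔ k ∈ p ∨ (k ∈ ks ∧ k ∈ s.keys)) := by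
  induction ks with
  | nil => intro s p k _; simp
  | cons a t ih =>
    intro s p k hnd
    simp only [List.nodup_cons] at hnd
    simp only [List.foldl_cons, innerB]
    by_cases h : s.contains a = true
    · have ha : a ∈ s.keys := (PySem.Dict.contains_iff_mem_keys s a).mp h
      rw [if_pos h, ih _ _ _ hnd.2, PySem.Set.mem_add]
      constructor
      · rintro ((hp | rfl) | ⟨ht, hs⟩)
        · exact Or.inl hp
        · exact Or.inr ⟨by simp, ha⟩
        · exact Or.inr ⟨by simp [ht], hs⟩
      · rintro (hp | ⟨hm, hs⟩)
        · exact Or.inl (Or.inl hp)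
        · rcases List.mem_cons.mp hm with rfl | ht
          · exact Or.inl (Or.inr rfl)
          · exact Or.inr ⟨ht, hs⟩
    · have ha : a ∉ s.keys := fun hm => h ((PySem.Dict.contains_iff_mem_keys s a).mpr hm)
      rw [if_neg h, ih _ _ _ hnd.2]
      constructor
      · rintro (hp | ⟨ht, hs⟩)
        · exact Or.inl hp
        · rcases (PySem.Dict.mem_keys_insert _ _ _ _).mp hs with rfl | hs'
          · exact absurd ht hnd.1
          · exact Or.inr ⟨by simp [ht], hs'⟩
      · rintro (hp | ⟨hm, hs⟩)
        · exact Or.inl hp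
        · rcases List.mem_cons.mp hm with rfl | ht
          · exact absurd hs ha
          · exact Or.inr ⟨ht, (PySem.Dict.mem_keys_insert _ _ _ _).mpr (Or.inr hs)⟩

theorem bfold_seen_keys (R : List (PySem.Dict String Int)) :
    ∀ (st : List (PySem.Dict String Int) × PySem.Dict String Unit × PySem.Set String),
    (R.foldl stepB st).2.1.keys = PySem.Set.update st.2.1.keys (R.map (fun r => r.keys)).flatten := by
  induction R with
  | nil => intro st; simp [PySem.Set.update]
  | cons r t ih =>
    intro st
    simp only [List.foldl_cons, List.map_cons, List.flatten_cons]
    rw [ih, PySem.Set.update_append]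
    congr 1
    exact innerB_seen_keys r.keys st.2.1 st.2.2

theorem bfold_pers (R : List (PySem.Dict String Int)) :
    ∀ (st : List (PySem.Dict String Int) × PySem.Dict String Unit × PySem.Set String) (k : String),
    (∀ r ∈ R, r.keys.Nodup) →
    (k ∈ (R.foldl stepB st).2.2 ↔ k ∈ st.2.2 ∨ 2 ≤ R.countP (fun r => decide (k ∈ r.keys)) ∨
      (k ∈ st.2.1.keys ∧ 1 ≤ R.countP (fun r => decide (k ∈ r.keys)))) := by
  induction R with
  | nil => intro st k _; simp
  | cons r t ih =>
    intro st k hnd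
    simp only [List.foldl_cons]
    have hstep : (stepB st r).2.2 = (r.keys.foldl innerB (st.2.1, st.2.2)).2 := rfl
    have hkeys : (stepB st r).2.1.keys = PySem.Set.update st.2.1.keys r.keys :=
      innerB_seen_keys r.keys st.2.1 st.2.2
    rw [ih (stepB st r) k (fun r' h => hnd r' (by simp [h])), hstep,
        innerB_pers r.keys st.2.1 st.2.2 k (hnd r (by simp)), hkeys, PySem.Set.mem_update,
        List.countP_cons]
    by_cases hr : k ∈ r.keys <;> by_cases hp : k ∈ st.2.2 <;> by_cases hs : k ∈ st.2.1.keys <;>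
      simp [hr, hp, hs] <;>
        first
          | omega
          | (intro h2
             have hpos : 0 < t.countP (fun r => decide (k ∈ r.keys)) := by omega
             have := List.countP_pos_iff.mp hpos
             simpa using this)

-- ---- assembling the two sides ----

theorem second_eq (R : List (PySem.Dict String Int)) (n : Nat) (hn : n = R.length)
    (hc : ∀ r ∈ R, ∃ xs : List String, r = PySem.Dict.counter xs) :
    (R.map (fun r => r.items),
     ((pyEnum R 0).foldl (fun d ir => ir.2.items.foldl (stepA ir.1) d)
        ((PySem.Set.ofList (R.map (fun r => r.keys)).flatten).foldl
          (fun d s => d.insert s (List.replicate n (0 : Int))) PySem.Dict.empty)).items.filter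
      (fun kv => decide (1 < (kv.2.map (fun n => if 0 < n then (1 : Int) else 0)).sum)))
    = ((R.foldl stepB ([], PySem.Dict.empty, PySem.Set.empty)).1.map (fun r => r.items),
       ((R.foldl stepB ([], PySem.Dict.empty, PySem.Set.empty)).2.1.keys.filter
          (fun k => PySem.Set.contains (R.foldl stepB ([], PySem.Dict.empty, PySem.Set.empty)).2.2 k)).map
        (fun k => (k, (R.foldl stepB ([], PySem.Dict.empty, PySem.Set.empty)).1.map (fun r => r.getD k 0)))) := by
  subst hn
  have hnd : ∀ r ∈ R, r.keys.Nodup := by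
    intro r hr; obtain ⟨xs, rfl⟩ := hc r hr; exact PySem.Dict.nodup_keys_counter xs
  set K : PySem.Set String := PySem.Set.ofList (R.map (fun r => r.keys)).flatten with hK
  have hKnd : K.Nodup := PySem.Set.nodup_ofList _
  -- the B-side fold
  have hB1 : (R.foldl stepB ([], PySem.Dict.empty, PySem.Set.empty)).1 = R := by
    simpa using bfold_fst R ([], PySem.Dict.empty, PySem.Set.empty)
  have hBkeys : (R.foldl stepB ([], PySem.Dict.empty, PySem.Set.empty)).2.1.keys = K := by
    rw [bfold_seen_keys R ([], PySem.Dict.empty, PySem.Set.empty)]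
    show PySem.Set.update PySem.Set.empty _ = _
    rw [PySem.Set.update_empty]
  have hBpers : ∀ k, (k ∈ (R.foldl stepB ([], PySem.Dict.empty, PySem.Set.empty)).2.2 ↔
      2 ≤ R.countP (fun r => decide (k ∈ r.keys))) := by
    intro k
    rw [bfold_pers R ([], PySem.Dict.empty, PySem.Set.empty) k hnd]
    show k ∈ PySem.Set.empty ∨ _ ∨ (k ∈ (PySem.Dict.empty : PySem.Dict String Unit).keys ∧ _) ↔ _
    simp [PySem.Set.empty, PySem.Dict.empty, PySem.Dict.keys]
  -- the A-side matrix
  set M0 : PySem.Dict String (List Int) :=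
    K.foldl (fun d s => d.insert s (List.replicate R.length (0 : Int))) PySem.Dict.empty with hM0
  have hM0items : M0.items = K.map (fun s => (s, List.replicate R.length (0 : Int))) := by
    rw [hM0]
    have := PySem.Dict.items_foldl_insert_fresh (l := K) (k := fun s => s)
      (v := fun _ => List.replicate R.length (0 : Int)) (d := PySem.Dict.empty)
      (by intro a _; rfl) (by simpa using hKnd)
    simpa using this
  have hM0keys : M0.keys = K := by
    rw [keys_eq_items_map_fst, hM0items, List.map_map]
    simp [Function.comp_def]
  have hM0getD : ∀ k ∈ K, M0.getD k [] = List.replicate R.length (0 : Int) := by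
    intro k hk
    exact PySem.Dict.getD_of_mem_items M0
      (hM0items ▸ List.mem_map.mpr ⟨k, hk, rfl⟩) (hM0keys ▸ hKnd) []
  have hsub : ∀ r ∈ R, ∀ x ∈ r.keys, x ∈ K := by
    intro r hr x hx
    rw [hK, PySem.Set.mem_ofList, List.mem_flatten]
    exact ⟨r.keys, List.mem_map.mpr ⟨r, hr, rfl⟩, hx⟩
  set M := (pyEnum R 0).foldl (fun d ir => ir.2.items.foldl (stepA ir.1) d) M0 with hM
  have hMkeys : M.keys = K := by
    rw [hM, outer_keys R 0 M0 (by intro r hr x hx; rw [hM0keys]; exact hsub r hr x hx), hM0keys]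
  have hMgetD : ∀ k ∈ K, M.getD k [] = R.map (fun r => r.getD k 0) := by
    intro k hk
    rw [hM, outer_getD R 0 M0 k [] hnd (by simpa using hM0getD k hk) rfl]
    simp
  have hMitems : M.items = K.map (fun k => (k, M.getD k [])) := by
    have := PySem.Dict.items_eq_map_keys M (hMkeys ▸ hKnd) []
    rwa [hMkeys] at this
  -- assemble
  refine Prod.ext (by rw [hB1]) ?_
  show M.items.filter _ = _
  rw [hMitems, hB1, hBkeys, List.filter_map]
  have hpred : ∀ k ∈ K,
      ((fun kv : String × List Int => decide (1 < (kv.2.map (fun n => if 0 < n then (1 : Int) else 0)).sum)) ∘ fun k => (k, M.getD k [])) k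
      = (fun k => PySem.Set.contains (R.foldl stepB ([], PySem.Dict.empty, PySem.Set.empty)).2.2 k) k := by
    intro k hk
    simp only [Function.comp]
    have hsum : (R.map (fun r => if 0 < r.getD k 0 then (1 : Int) else 0)).sum
        = (R.countP (fun r => decide (0 < r.getD k 0)) : Int) := by
      simpa using PySem.List.sum_map_ite_one_zero (fun r : PySem.Dict String Int => decide (0 < r.getD k 0)) R
    have hcp : R.countP (fun r => decide (0 < r.getD k 0)) = R.countP (fun r => decide (k ∈ r.keys)) := by
      apply List.countP_congr
      intro r hr
      obtain ⟨xs, rfl⟩ := hc r hr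
      simp
    have hcont : PySem.Set.contains (R.foldl stepB ([], PySem.Dict.empty, PySem.Set.empty)).2.2 k
        = decide (2 ≤ R.countP (fun r => decide (k ∈ r.keys))) := by
      by_cases h : 2 ≤ R.countP (fun r => decide (k ∈ r.keys))
      · exact ((PySem.Set.contains_iff _ _).mpr ((hBpers k).mpr h)).trans (decide_eq_true h).symm
      · have : k ∉ (R.foldl stepB ([], PySem.Dict.empty, PySem.Set.empty)).2.2 :=
          fun hm => h ((hBpers k).mp hm)
        simp only [h, decide_false]
        rw [← Bool.not_eq_true]
        intro hc'
        exact this ((PySem.Set.contains_iff _ _).mp hc')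
    rw [hcont]
    simp only [hMgetD k hk, List.map_map, Function.comp_def, hsum, hcp]
    by_cases h : 2 ≤ R.countP (fun r => decide (k ∈ r.keys))
    · simp only [h, decide_true, decide_eq_true_eq]
      push_cast; omega
    · simp only [h, decide_false, decide_eq_false_iff_not]
      push_cast; omega
  rw [List.filter_congr hpred]
  apply List.map_congr_left
  intro k hk
  have hkK : k ∈ K := List.mem_of_mem_filter hk
  simp only [hMgetD k hkK]

-- ===== VERDICT (by name: the statement is the Claim_ definition above) =====
theorem get_repeated_and_persistent_strains_spec : Claim_equal_get_repeated_and_persistent_strains := by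
  intro samples_by_year _
  unfold Spec_get_repeated_and_persistent_strains
  unfold get_repeated_and_persistent_strains get_repeated_and_persistent_strains_alt
  rw [bfold_eq]
  exact second_eq (samples_by_year.map (fun samples => PySem.Dict.counter (samples.map (fun p => p.1))))
    samples_by_year.length (by simp)
    (by intro r hr; obtain ⟨samples, _, rfl⟩ := List.mem_map.mp hr; exact ⟨samples.map (fun p => p.1), rfl⟩)
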